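-- pv_equiv track=rewrite | github.com/alexmasterblack/python_programming | sales +.py | count_things
-- ===== SOURCE A (Python) =====
-- def count_things(purchase):
--     info = {}
--     for j in purchase:
--         if j[0] in info:
--             sup = info.get(j[0])
--             info[j[0]] = int(sup) + int(j[1])
--         else:
--             info[j[0]] = j[1]
--
--     return sorted(info.items())
-- ===== SOURCE B (Python) =====
-- def count_things(purchase):
--     result = []
--     for key, value in sorted(purchase, key=lambda p: p[0]):
--         if result and result[-1][0] == key:
--             result[-1] = (key, result[-1][1] + value)
--         else:
--             result.append((key, value))
--     return result
-- ===== Notes on version B (the rewrite author's own statement) =====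
-- stated objective: alternative
-- what changed: B replaces the dict-accumulate-then-sort-items pipeline by sort-by-key first, then a single linear scan that merges adjacent equal-key runs into sums.
import Mathlib
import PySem

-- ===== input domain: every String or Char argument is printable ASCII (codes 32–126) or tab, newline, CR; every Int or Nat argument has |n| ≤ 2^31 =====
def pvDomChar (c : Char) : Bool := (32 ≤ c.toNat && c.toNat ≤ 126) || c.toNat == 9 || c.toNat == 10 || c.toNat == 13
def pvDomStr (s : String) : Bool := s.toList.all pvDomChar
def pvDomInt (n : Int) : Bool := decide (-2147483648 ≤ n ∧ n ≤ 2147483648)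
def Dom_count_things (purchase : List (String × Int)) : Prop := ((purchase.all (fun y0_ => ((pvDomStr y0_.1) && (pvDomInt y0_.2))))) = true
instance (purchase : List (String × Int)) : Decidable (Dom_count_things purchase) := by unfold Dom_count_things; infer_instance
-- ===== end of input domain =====

-- B replaces A's dict-accumulate-then-sort-items pipeline by sort-by-key first, then one linear scan merging adjacent equal-key runs (alternative decomposition, same return value).

-- ===== PORT A =====
-- A's loop body: `if j[0] in info: sup = info.get(j[0]); info[j[0]] = int(sup) + int(j[1]) else: info[j[0]] = j[1]`
-- (under the contains-check `info.get(j[0])` is the stored value, written `d.getD j.1 0`; `int` applied to an int is the identity)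
def aStep (d : PySem.Dict String Int) (j : String × Int) : PySem.Dict String Int :=
  if d.contains j.1 then d.insert j.1 (d.getD j.1 0 + j.2) else d.insert j.1 j.2

def count_things (purchase : List (String × Int)) : List (String × Int) :=
  let info := purchase.foldl aStep PySem.Dict.empty
  PySem.List.sorted2 info.items (fun p => p.1) (fun p => p.2)

-- ===== PORT B =====
-- B's loop body: `if result and result[-1][0] == key: result[-1] = (key, result[-1][1] + value) else: result.append((key, value))`
def bStep (result : List (String × Int)) (p : String × Int) : List (String × Int) :=
  match result.getLast? with
  | some q => if q.1 = p.1 then result.dropLast ++ [(p.1, q.2 + p.2)] else result ++ [p]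
  | none => result ++ [p]

def count_things_alt (purchase : List (String × Int)) : List (String × Int) :=
  (PySem.List.sorted purchase (fun p => p.1)).foldl bStep []

-- ===== PRECONDITION & SPEC =====
def Spec_count_things (purchase : List (String × Int)) (out : List (String × Int)) : Prop := out = count_things_alt purchase
instance (purchase : List (String × Int)) (out : List (String × Int)) : Decidable (Spec_count_things purchase out) := by unfold Spec_count_things; infer_instance

-- ===== CLAIM (what is proved, stated in full; the proofs are below) =====
def Claim_equal_count_things : Prop := ∀ (purchase : List (String × Int)), Dom_count_things purchase → Spec_count_things purchase (count_things purchase)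

-- ===== LEMMAS AND PROOFS =====

/-- Sum of the values attached to key `k` in `l`. -/
def ssum (l : List (String × Int)) (k : String) : Int :=
  ((l.filter (fun p => decide (p.1 = k))).map Prod.snd).sum

lemma ssum_nil (k : String) : ssum [] k = 0 := rfl

lemma ssum_cons (p : String × Int) (t : List (String × Int)) (k : String) :
    ssum (p :: t) k = (if p.1 = k then p.2 else 0) + ssum t k := by
  by_cases h : p.1 = k <;> simp [ssum, h]

lemma ssum_append (a b : List (String × Int)) (k : String) :
    ssum (a ++ b) k = ssum a k + ssum b k := by
  simp [ssum, List.filter_append]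

lemma ssum_eq_zero (l : List (String × Int)) (k : String) (h : ∀ p ∈ l, p.1 ≠ k) :
    ssum l k = 0 := by
  have : l.filter (fun p => decide (p.1 = k)) = [] := by
    simp [List.filter_eq_nil_iff]; exact fun a b hab => h (a, b) hab
  simp [ssum, this]

lemma ssum_perm {l l' : List (String × Int)} (h : l.Perm l') (k : String) :
    ssum l k = ssum l' k := by
  exact ((h.filter _).map _).sum_eq

-- ---- A side ----

lemma aStep_eq (d : PySem.Dict String Int) (j : String × Int) :
    aStep d j = d.insert j.1 (if d.contains j.1 then d.getD j.1 0 + j.2 else j.2) := by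
  by_cases h : d.contains j.1 <;> simp [aStep, h]

lemma getD_aStep (d : PySem.Dict String Int) (j : String × Int) (k : String) :
    (aStep d j).getD k 0 = d.getD k 0 + (if j.1 = k then j.2 else 0) := by
  by_cases hk : j.1 = k
  · subst hk
    by_cases hc : d.contains j.1
    · simp [aStep, hc, PySem.Dict.getD_insert_self]
    · simp [aStep, hc, PySem.Dict.getD_insert_self,
        PySem.Dict.getD_of_not_contains d 0 (by simpa using hc)]
  · by_cases hc : d.contains j.1 <;>
      simp [aStep, hc, PySem.Dict.getD_insert_of_ne d _ 0 (fun h => hk h.symm), hk]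

lemma getD_foldl_aStep (l : List (String × Int)) :
    ∀ (d : PySem.Dict String Int) (k : String),
      (l.foldl aStep d).getD k 0 = d.getD k 0 + ssum l k := by
  induction l with
  | nil => simp [ssum_nil]
  | cons j t ih =>
    intro d k
    rw [List.foldl_cons, ih, getD_aStep, ssum_cons]
    omega

lemma keys_foldl_aStep (l : List (String × Int)) :
    (l.foldl aStep PySem.Dict.empty).keys = PySem.Set.ofList (l.map Prod.fst) := by
  have hstep : aStep = fun (d : PySem.Dict String Int) (j : String × Int) =>
      d.insert j.1 (if d.contains j.1 then d.getD j.1 0 + j.2 else j.2) := by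
    funext d j; exact aStep_eq d j
  rw [hstep, PySem.Dict.keys_foldl_insert_key l Prod.fst _ PySem.Dict.empty]
  simp [PySem.Dict.keys_empty, PySem.Set.update_nil_left]

lemma items_foldl_aStep (l : List (String × Int)) :
    (l.foldl aStep PySem.Dict.empty).items
      = (PySem.Set.ofList (l.map Prod.fst)).map (fun k => (k, ssum l k)) := by
  have hnd : (l.foldl aStep PySem.Dict.empty).keys.Nodup := by
    rw [keys_foldl_aStep]; exact PySem.Set.nodup_ofList _
  rw [PySem.Dict.items_eq_map_keys _ hnd 0, keys_foldl_aStep]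
  refine List.map_congr_left fun k hk => ?_
  rw [getD_foldl_aStep]
  simp [PySem.Dict.getD_empty]

-- ---- B side ----

lemma bStep_eq_some (res : List (String × Int)) (q p : String × Int)
    (h : res.getLast? = some q) :
    bStep res p = if q.1 = p.1 then res.dropLast ++ [(p.1, q.2 + p.2)] else res ++ [p] := by
  unfold bStep; rw [h]

lemma bStep_eq_none (res : List (String × Int)) (p : String × Int)
    (h : res.getLast? = none) : bStep res p = res ++ [p] := by
  unfold bStep; rw [h]

lemma bStep_ne_nil (res : List (String × Int)) (p : String × Int) : bStep res p ≠ [] := by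
  cases h : res.getLast? with
  | none => rw [bStep_eq_none res p h]; simp
  | some q => rw [bStep_eq_some res q p h]; split <;> simp

lemma foldl_bStep_append (l : List (String × Int)) :
    ∀ (res1 res2 : List (String × Int)), res2 ≠ [] →
      l.foldl bStep (res1 ++ res2) = res1 ++ l.foldl bStep res2 := by
  induction l with
  | nil => simp
  | cons p t ih =>
    intro res1 res2 h2
    have hb : bStep (res1 ++ res2) p = res1 ++ bStep res2 p := by
      cases h : res2.getLast? with
      | none => exact absurd (List.getLast?_eq_none_iff.mp h) h2
      | some q =>
        have hl : (res1 ++ res2).getLast? = some q := by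
          rw [List.getLast?_append, h]; rfl
        rw [bStep_eq_some _ q p hl, bStep_eq_some _ q p h]
        split
        · rw [List.dropLast_append]
          simp [h2, List.append_assoc]
        · simp [List.append_assoc]
    rw [List.foldl_cons, List.foldl_cons, hb, ih _ _ (bStep_ne_nil res2 p)]

lemma foldl_bStep_run (t1 : List (String × Int)) (k : String) (h : ∀ p ∈ t1, p.1 = k) :
    ∀ v, t1.foldl bStep [(k, v)] = [(k, v + ssum t1 k)] := by
  induction t1 with
  | nil => simp [ssum_nil]
  | cons p t ih =>
    intro v
    have hp : p.1 = k := h p List.mem_cons_self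
    have hb : bStep [(k, v)] p = [(k, v + p.2)] := by
      rw [bStep_eq_some _ (k, v) p rfl]
      simp [hp.symm]
    rw [List.foldl_cons, hb, ih (fun q hq => h q (List.mem_cons_of_mem _ hq)) (v + p.2),
      ssum_cons]
    rw [hp]
    simp
    ring

lemma foldl_bStep_newkey (l : List (String × Int)) (k : String) (s : Int)
    (h : ∀ p ∈ l, p.1 ≠ k) :
    l.foldl bStep [(k, s)] = (k, s) :: l.foldl bStep [] := by
  cases l with
  | nil => simp
  | cons q t =>
    have hq : q.1 ≠ k := h q List.mem_cons_self
    have hb : bStep [(k, s)] q = [(k, s)] ++ [q] := by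
      rw [bStep_eq_some _ (k, s) q rfl]
      simp [Ne.symm hq]
    rw [List.foldl_cons, hb, foldl_bStep_append t [(k, s)] [q] (by simp)]
    have hb0 : bStep [] q = [q] := by rw [bStep_eq_none _ q rfl]; rfl
    rw [List.foldl_cons, hb0]
    rfl

-- ---- Set helpers ----

lemma foldl_add_cons (xs : List String) (k : String) (hk : k ∉ xs) :
    ∀ s : List String, xs.foldl PySem.Set.add (k :: s) = k :: xs.foldl PySem.Set.add s := by
  induction xs with
  | nil => intro s; rfl
  | cons x t ih =>
    intro s
    have hx : x ≠ k := fun h => hk (h ▸ List.mem_cons_self)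
    have hadd : PySem.Set.add (k :: s) x = k :: PySem.Set.add s x := by
      rw [PySem.Set.add_eq_ite, PySem.Set.add_eq_ite]
      by_cases hs : x ∈ s
      · simp [hs, hx]
      · simp [hs, hx]
    rw [List.foldl_cons, List.foldl_cons, hadd,
      ih (fun h => hk (List.mem_cons_of_mem _ h))]

lemma foldl_add_const (xs : List String) (k : String) (hx : ∀ x ∈ xs, x = k) :
    xs.foldl PySem.Set.add [k] = [k] := by
  induction xs with
  | nil => rfl
  | cons x t ih =>
    have hxk : x = k := hx x List.mem_cons_self
    rw [List.foldl_cons, hxk, PySem.Set.add_of_mem List.mem_cons_self]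
    exact ih fun y hy => hx y (List.mem_cons_of_mem _ hy)

lemma ofList_run (k : String) (xs1 xs2 : List String)
    (h1 : ∀ x ∈ xs1, x = k) (h2 : k ∉ xs2) :
    PySem.Set.ofList (k :: (xs1 ++ xs2)) = k :: PySem.Set.ofList xs2 := by
  rw [PySem.Set.ofList_eq_foldl, PySem.Set.ofList_eq_foldl]
  rw [List.foldl_cons, List.foldl_append]
  have h0 : PySem.Set.add [] k = [k] := rfl
  rw [h0, foldl_add_const xs1 k h1, foldl_add_cons xs2 k h2 []]

lemma ofList_sublist (xs : List String) : (PySem.Set.ofList xs).Sublist xs := by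
  induction xs using List.reverseRecOn with
  | nil => simp
  | append_singleton t x ih =>
    rw [PySem.Set.ofList_append_singleton, PySem.Set.add_eq_ite]
    split
    · exact ih.trans (List.sublist_append_left t [x])
    · exact List.Sublist.append ih (List.Sublist.refl [x])

-- ---- B characterisation on sorted input ----

lemma foldl_bStep_sorted :
    ∀ (n : Nat) (l : List (String × Int)), l.length ≤ n →
      l.Pairwise (fun a b => a.1 ≤ b.1) →
      l.foldl bStep [] = (PySem.Set.ofList (l.map Prod.fst)).map (fun k => (k, ssum l k)) := by
  intro n
  induction n with
  | zero =>
    intro l hl _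
    have hnil : l = [] := List.eq_nil_of_length_eq_zero (Nat.le_zero.mp hl)
    subst hnil; rfl
  | succ n ih =>
    intro l hl hp
    match l with
    | [] => rfl
    | (k, v) :: t =>
      obtain ⟨hhead, htp⟩ := List.pairwise_cons.mp hp
      have hsplit : t.takeWhile (fun p => decide (p.1 = k)) ++ t.dropWhile (fun p => decide (p.1 = k)) = t :=
        List.takeWhile_append_dropWhile
      have h1 : ∀ p ∈ t.takeWhile (fun p => decide (p.1 = k)), p.1 = k :=
        fun p hp1 => by simpa using List.mem_takeWhile_imp hp1
      have hp2 : (t.dropWhile (fun p => decide (p.1 = k))).Pairwise (fun a b => a.1 ≤ b.1) :=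
        htp.sublist (List.dropWhile_sublist _)
      have h2 : ∀ p ∈ t.dropWhile (fun p => decide (p.1 = k)), p.1 ≠ k := by
        cases ht2h : t.dropWhile (fun p => decide (p.1 = k)) with
        | nil => simp
        | cons q r =>
          have hqk : ¬ q.1 = k := by
            have := List.head_dropWhile_not (fun p : String × Int => decide (p.1 = k))
              (l := t) (by simp [ht2h])
            simpa [ht2h] using this
          have hkq : k ≤ q.1 := hhead q ((List.dropWhile_sublist _).subset (ht2h ▸ List.mem_cons_self))
          have hklt : k < q.1 := lt_of_le_of_ne hkq (fun h => hqk h.symm)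
          intro p hpm
          rcases List.mem_cons.mp hpm with rfl | hpr
          · exact hqk
          · have hp2' := hp2
            rw [ht2h] at hp2'
            have hqp : q.1 ≤ p.1 := (List.pairwise_cons.mp hp2').1 p hpr
            exact fun h => absurd (lt_of_lt_of_le hklt hqp) (by rw [h]; exact lt_irrefl k)
      -- lengths and second recursive call
      have hlen2 : (t.dropWhile (fun p => decide (p.1 = k))).length ≤ n := by
        have h1' := (List.dropWhile_sublist (l := t) (fun p => decide (p.1 = k))).length_le
        simp at hl; omega
      have hrec := ih _ hlen2 hp2
      -- compute the fold
      rw [List.foldl_cons]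
      have hb0 : bStep [] (k, v) = [(k, v)] := rfl
      rw [hb0, ← hsplit, List.foldl_append,
        foldl_bStep_run _ k h1 v, foldl_bStep_newkey _ k _ h2, hrec]
      -- compute the right-hand side
      have hmap : ((k, v) :: (t.takeWhile (fun p => decide (p.1 = k)) ++ t.dropWhile (fun p => decide (p.1 = k)))).map Prod.fst
          = k :: ((t.takeWhile (fun p => decide (p.1 = k))).map Prod.fst
              ++ (t.dropWhile (fun p => decide (p.1 = k))).map Prod.fst) := by
        rw [List.map_cons, List.map_append]
      rw [hmap, ofList_run k _ _
        (fun x hx => by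
          obtain ⟨p, hpm, rfl⟩ := List.mem_map.mp hx
          exact h1 p hpm)
        (fun hx => by
          obtain ⟨p, hpm, hpk⟩ := List.mem_map.mp hx
          exact h2 p hpm hpk),
        List.map_cons]
      congr 1
      · -- head entry
        have hz : ssum (t.dropWhile (fun p => decide (p.1 = k))) k = 0 :=
          ssum_eq_zero _ k h2
        rw [ssum_cons, ssum_append, hz]
        simp
      · -- tail entries
        refine List.map_congr_left fun j hj => ?_
        have hjm : j ∈ (t.dropWhile (fun p => decide (p.1 = k))).map Prod.fst :=
          (PySem.Set.mem_ofList _ j).mp hj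
        obtain ⟨p, hpm, rfl⟩ := List.mem_map.mp hjm
        have hjk : p.1 ≠ k := h2 p hpm
        have hz : ssum (t.takeWhile (fun q => decide (q.1 = k))) p.1 = 0 :=
          ssum_eq_zero _ p.1 (fun q hq h => hjk (h ▸ h1 q hq))
        rw [ssum_cons, ssum_append, hz]
        simp [Ne.symm hjk]

-- ---- sorted2 with distinct keys behaves like sorted by key ----

lemma insertBy_cons {α : Type} (b : α → α → Bool) (x y : α) (ys : List α) :
    PySem.List.insertBy b x (y :: ys)
      = if b x y then x :: y :: ys else y :: PySem.List.insertBy b x ys := by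
  simp [PySem.List.insertBy]

lemma insertBy_congr {α : Type} (bf bg : α → α → Bool) (x : α) (ys : List α)
    (h : ∀ y ∈ ys, bf x y = bg x y) :
    PySem.List.insertBy bf x ys = PySem.List.insertBy bg x ys := by
  induction ys with
  | nil => rfl
  | cons y t ih =>
    rw [insertBy_cons, insertBy_cons, h y List.mem_cons_self,
      ih (fun z hz => h z (List.mem_cons_of_mem _ hz))]

lemma foldl_insertBy_congr {α : Type} (bf bg : α → α → Bool) (S : List α) :
    ∀ (xs acc : List α), (∀ a ∈ acc, a ∈ S) → (∀ a ∈ xs, a ∈ S) →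
      (∀ a b, a ∈ S → b ∈ S → bf a b = bg a b) →
      xs.foldl (fun acc x => PySem.List.insertBy bf x acc) acc
        = xs.foldl (fun acc x => PySem.List.insertBy bg x acc) acc := by
  intro xs
  induction xs with
  | nil => intros; rfl
  | cons x t ih =>
    intro acc hacc hxs hfg
    rw [List.foldl_cons, List.foldl_cons,
      insertBy_congr bf bg x acc (fun y hy => hfg x y (hxs x List.mem_cons_self) (hacc y hy))]
    refine ih _ (fun a ha => ?_) (fun a ha => hxs a (List.mem_cons_of_mem _ ha)) hfg
    rcases (PySem.List.mem_insertBy bg x a acc).mp ha with rfl | hm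
    · exact hxs a List.mem_cons_self
    · exact hacc a hm

lemma sorted2_eq_of_perm_of_pairwise_lt (xs ys : List (String × Int))
    (hkv : ∀ a ∈ xs, ∀ b ∈ xs, a.1 = b.1 → a.2 = b.2)
    (hperm : ys.Perm xs) (hys : ys.Pairwise (fun a b => a.1 < b.1)) :
    PySem.List.sorted2 xs (fun p => p.1) (fun p => p.2) = ys := by
  have h2 : PySem.List.sorted2 xs (fun p => p.1) (fun p => p.2)
      = xs.foldl (fun acc x => PySem.List.insertBy
          (fun a b => decide (a.1 < b.1) || (!decide (b.1 < a.1) && decide (a.2 < b.2))) x acc) [] := rfl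
  have hagree : ∀ a b, a ∈ xs → b ∈ xs →
      (fun (a b : String × Int) => decide (a.1 < b.1) || (!decide (b.1 < a.1) && decide (a.2 < b.2))) a b
        = (fun (a b : String × Int) => decide (a.1 < b.1)) a b := by
    intro a b ha hb
    by_cases hab : a.1 < b.1
    · simp [hab]
    · by_cases hba : b.1 < a.1
      · simp [hab, hba]
      · have hk : a.1 = b.1 := le_antisymm (not_lt.mp hba) (not_lt.mp hab)
        have hv : a.2 = b.2 := hkv a ha b hb hk
        simp [hab, hba, hv]
  rw [h2, foldl_insertBy_congr _ _ xs xs [] (by simp) (fun a ha => ha) hagree,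
    ← PySem.List.sorted_eq_foldl_insertBy]
  exact PySem.List.sorted_eq_of_perm_of_pairwise_lt xs ys _ hperm hys

-- ---- main equality ----

lemma main_eq (purchase : List (String × Int)) :
    count_things purchase = count_things_alt purchase := by
  show PySem.List.sorted2 (purchase.foldl aStep PySem.Dict.empty).items (fun p => p.1) (fun p => p.2)
      = (PySem.List.sorted purchase (fun p => p.1)).foldl bStep []
  rw [items_foldl_aStep]
  rw [foldl_bStep_sorted (PySem.List.sorted purchase (fun p => p.1)).length _ le_rfl
    ((List.pairwise_map.mp (PySem.List.sorted_map_key_pairwise purchase (fun p => p.1))))]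
  have hperm_sp : (PySem.List.sorted purchase (fun p => p.1)).Perm purchase :=
    PySem.List.sorted_perm purchase _ _
  -- the per-key sums agree between the sorted list and the original
  have hmapeq : (PySem.Set.ofList ((PySem.List.sorted purchase (fun p => p.1)).map Prod.fst)).map
        (fun k => (k, ssum (PySem.List.sorted purchase (fun p => p.1)) k))
      = (PySem.Set.ofList ((PySem.List.sorted purchase (fun p => p.1)).map Prod.fst)).map
        (fun k => (k, ssum purchase k)) :=
    List.map_congr_left (fun j _ => by rw [ssum_perm hperm_sp])
  rw [hmapeq]
  -- apply the sorted2 characterisation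
  refine sorted2_eq_of_perm_of_pairwise_lt _ _ ?_ ?_ ?_
  · intro a ha b hb hab
    obtain ⟨k1, hk1, rfl⟩ := List.mem_map.mp ha
    obtain ⟨k2, hk2, rfl⟩ := List.mem_map.mp hb
    simp only at hab
    simp [hab]
  · refine List.Perm.map _ ?_
    refine (List.perm_ext_iff_of_nodup (PySem.Set.nodup_ofList _) (PySem.Set.nodup_ofList _)).mpr ?_
    intro j
    rw [PySem.Set.mem_ofList, PySem.Set.mem_ofList]
    exact (hperm_sp.map Prod.fst).mem_iff
  · have hle : ((PySem.List.sorted purchase (fun p => p.1)).map Prod.fst).Pairwise (· ≤ ·) :=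
      PySem.List.sorted_map_key_pairwise purchase _
    have hle' := List.Pairwise.sublist (ofList_sublist _) hle
    have hne : (PySem.Set.ofList ((PySem.List.sorted purchase (fun p => p.1)).map Prod.fst)).Pairwise (· ≠ ·) :=
      PySem.Set.nodup_ofList _
    have hlt := (hle'.and hne).imp (fun h => lt_of_le_of_ne h.1 h.2)
    exact List.pairwise_map.mpr hlt

-- ===== VERDICT (by name: the statement is the Claim_ definition above) =====
theorem count_things_spec : Claim_equal_count_things := by
  intro purchase _
  exact main_eq purchase
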